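-- pv_equiv track=rewrite | github.com/marlox-ouda/aoc | 2019/11/password.py | validate_double
-- ===== SOURCE A (Python) =====
-- def validate_double(pwd):
--     tested_passwords = (first == second and first or False
--                         for first, second in zip(pwd[:-1], pwd[1:]))
--     valide_letters = list(filter(lambda l: l, tested_passwords))
--     if len(list(valide_letters)) < 2:
--         return False
--     if valide_letters[0] == valide_letters[-1]:
--         return False
--     return True
-- ===== SOURCE B (Python) =====
-- def validate_double(pwd):
--     # Run-length scan: collect runs of equal adjacent characters of length >= 2.
--     kept = []
--     i, n = 0, len(pwd)
--     while i < n: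
--         j = i
--         while j < n and pwd[j] == pwd[i]:
--             j += 1
--         if j - i >= 2:
--             kept.append((pwd[i], j - i))
--         i = j
--     total = sum(l - 1 for _, l in kept)
--     if total < 2:
--         return False
--     if kept[0][0] == kept[-1][0]:
--         return False
--     return True
-- ===== Notes on version B (the rewrite author's own statement) =====
-- stated objective: alternative
-- what changed: Replaces the pairwise zip/filter scan over adjacent character pairs with a run-length-encoding scan: runs of equal characters of length >= 2 are collected, the pair count is the sum of (length-1), and the first/last run keys replace the first/last matched pair.
import Mathlib
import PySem

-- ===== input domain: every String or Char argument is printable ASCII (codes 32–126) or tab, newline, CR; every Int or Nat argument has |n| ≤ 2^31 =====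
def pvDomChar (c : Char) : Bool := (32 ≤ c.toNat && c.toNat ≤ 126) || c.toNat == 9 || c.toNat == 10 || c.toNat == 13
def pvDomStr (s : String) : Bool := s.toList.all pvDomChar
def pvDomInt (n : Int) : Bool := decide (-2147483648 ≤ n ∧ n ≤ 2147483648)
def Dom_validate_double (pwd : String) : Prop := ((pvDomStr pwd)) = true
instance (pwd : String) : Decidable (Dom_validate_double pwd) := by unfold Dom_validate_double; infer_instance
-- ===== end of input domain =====

-- B replaces A's pairwise zip/filter scan with a run-length-encoding scan (alternative, same cost).

-- ===== PORT A =====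
def validate_double (pwd : String) : Bool :=
  let cs := pwd.toList
  -- (first == second and first or False) for the zipped adjacent pairs; False ↦ none
  let tested := (List.zip (PySem.List.slice cs none (some (-1))) (PySem.List.slice cs (some 1) none)).map
      (fun fs => if fs.1 == fs.2 then some fs.1 else none)
  -- filter(lambda l: l, …): a Char is always truthy, False is dropped
  let valide := tested.filterMap id
  if valide.length < 2 then false
  else if PySem.List.pyGet? valide 0 == PySem.List.pyGet? valide (-1) then false
  else true

-- ===== PORT B =====
-- the inner while loop of Source B: split off the run of characters equal to c
def runsB : List Char → List (Char × Nat)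
  | [] => []
  | c :: rest =>
      let p := rest.span (fun d => d == c)
      (c, p.1.length + 1) :: runsB p.2
  termination_by cs => cs.length
  decreasing_by
    simp only [List.span_eq_takeWhile_dropWhile]
    exact Nat.lt_succ_of_le (List.length_dropWhile_le _ _)

def validate_double_alt (pwd : String) : Bool :=
  let kept := (runsB pwd.toList).filter (fun p => 2 ≤ p.2)
  let total : Nat := (kept.map (fun p => p.2 - 1)).sum
  if total < 2 then false
  else if (PySem.List.pyGet? kept 0).map Prod.fst == (PySem.List.pyGet? kept (-1)).map Prod.fst then false
  else true

-- ===== PRECONDITION & SPEC =====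
def Spec_validate_double (pwd : String) (out : Bool) : Prop := out = validate_double_alt pwd
instance (pwd : String) (out : Bool) : Decidable (Spec_validate_double pwd out) := by unfold Spec_validate_double; infer_instance

-- ===== CLAIM (what is proved, stated in full; the proofs are below) =====
def Claim_equal_validate_double : Prop := ∀ (pwd : String), Dom_validate_double pwd → Spec_validate_double pwd (validate_double pwd)

-- ===== LEMMAS AND PROOFS =====

/-- The list of characters at positions where a character equals its successor. -/
def pairsOf : List Char → List Char
  | [] => []
  | [_] => []
  | a :: b :: rest => (if a == b then [a] else []) ++ pairsOf (b :: rest)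

def runPairs (p : Char × Nat) : List Char := List.replicate (p.2 - 1) p.1

theorem valide_eq_pairsOf (cs : List Char) :
    (List.zip cs.dropLast (cs.drop 1)).filterMap
      (fun fs : Char × Char => if fs.1 == fs.2 then some fs.1 else none) = pairsOf cs := by
  match cs with
  | [] => rfl
  | [_] => rfl
  | a :: b :: rest =>
      have ih := valide_eq_pairsOf (b :: rest)
      simp only [List.drop_succ_cons, List.drop_zero] at ih ⊢
      simp only [List.dropLast, List.zip_cons_cons, List.filterMap_cons, pairsOf]
      by_cases h : a == b <;> simp only [h, if_pos, Bool.false_eq_true, ite_false, ih] <;> simp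

theorem pairsOf_run (pre : List Char) (c : Char) (post : List Char)
    (hpre : ∀ x ∈ pre, x = c) (hpost : ∀ d, post.head? = some d → ¬ d = c) :
    pairsOf (c :: (pre ++ post)) = List.replicate pre.length c ++ pairsOf post := by
  induction pre with
  | nil =>
      match post with
      | [] => rfl
      | d :: r =>
          have hd : ¬ d = c := hpost d rfl
          simp [pairsOf, (by simpa using Ne.symm hd : ¬ c = d)]
  | cons e pre' ih =>
      have he : e = c := hpre e (by simp)
      subst he
      have : pairsOf (e :: (pre' ++ post)) = List.replicate pre'.length e ++ pairsOf post :=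
        ih (fun x hx => hpre x (by simp [hx]))
      simp [pairsOf, List.replicate_succ, this]

theorem flatMap_runsB (cs : List Char) :
    (runsB cs).flatMap runPairs = pairsOf cs := by
  match cs with
  | [] => rw [runsB]; rfl
  | c :: rest =>
      rw [runsB]
      simp only [List.span_eq_takeWhile_dropWhile, List.flatMap_cons]
      have ih := flatMap_runsB (rest.dropWhile (fun d => d == c))
      have hsplit : rest = rest.takeWhile (fun d => d == c) ++ rest.dropWhile (fun d => d == c) :=
        (List.takeWhile_append_dropWhile).symm
      have hpre : ∀ x ∈ rest.takeWhile (fun d => d == c), x = c := by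
        intro x hx
        have := List.mem_takeWhile_imp hx
        simpa using this
      have hpost : ∀ d, (rest.dropWhile (fun d => d == c)).head? = some d → ¬ d = c := by
        intro d hd
        have := List.head?_dropWhile_not (p := fun d => d == c) rest
        rw [hd] at this
        simpa using this
      conv_rhs => rw [hsplit]
      rw [pairsOf_run _ c _ hpre hpost, ih]
      simp [runPairs]
  termination_by cs.length
  decreasing_by
    exact Nat.lt_succ_of_le (List.length_dropWhile_le _ _)

theorem runsB_pos (cs : List Char) : ∀ p ∈ runsB cs, 1 ≤ p.2 := by
  match cs with
  | [] => intro p hp; simp [runsB] at hp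
  | c :: rest =>
      rw [runsB]
      intro p hp
      rcases List.mem_cons.mp hp with h | h
      · subst h; simp
      · exact runsB_pos _ p h
  termination_by cs.length
  decreasing_by
    simp only [List.span_eq_takeWhile_dropWhile]
    exact Nat.lt_succ_of_le (List.length_dropWhile_le _ _)

theorem flatMap_filter_kept (rs : List (Char × Nat)) (hpos : ∀ p ∈ rs, 1 ≤ p.2) :
    (rs.filter (fun p => 2 ≤ p.2)).flatMap runPairs = rs.flatMap runPairs := by
  induction rs with
  | nil => rfl
  | cons p rs ih =>
      have h1 : 1 ≤ p.2 := hpos p (by simp)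
      have ih' := ih (fun q hq => hpos q (by simp [hq]))
      by_cases h : 2 ≤ p.2
      · simp [h, ih']
      · have hp1 : p.2 = 1 := by omega
        simp [ih', runPairs, hp1]

theorem length_flatMap_kept (rs : List (Char × Nat)) :
    (rs.flatMap runPairs).length = (rs.map (fun p => p.2 - 1)).sum := by
  induction rs with
  | nil => rfl
  | cons p rs ih => simp [runPairs, ih]

theorem head?_flatMap_kept (rs : List (Char × Nat)) (h2 : ∀ p ∈ rs, 2 ≤ p.2) :
    (rs.flatMap runPairs).head? = rs.head?.map Prod.fst := by
  match rs with
  | [] => rfl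
  | p :: rs =>
      have hp : 2 ≤ p.2 := h2 p (by simp)
      have : runPairs p = p.1 :: List.replicate (p.2 - 2) p.1 := by
        simp only [runPairs]
        rw [show p.2 - 1 = (p.2 - 2) + 1 by omega, List.replicate_succ]
      simp [this]

theorem getLast?_flatMap_kept (rs : List (Char × Nat)) (h2 : ∀ p ∈ rs, 2 ≤ p.2) :
    (rs.flatMap runPairs).getLast? = rs.getLast?.map Prod.fst := by
  match rs with
  | [] => rfl
  | [p] =>
      have hp : 2 ≤ p.2 := h2 p (by simp)
      have : runPairs p = List.replicate (p.2 - 2) p.1 ++ [p.1] := by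
        simp only [runPairs]
        rw [show p.2 - 1 = (p.2 - 2) + 1 by omega, List.replicate_succ']
      simp [this]
  | p :: q :: rs =>
      have ih := getLast?_flatMap_kept (q :: rs) (fun r hr => h2 r (by simp at hr ⊢; tauto))
      have hne : (q :: rs).flatMap runPairs ≠ [] := by
        have hq : 2 ≤ q.2 := h2 q (by simp)
        simp only [List.flatMap_cons]
        intro hcon
        rcases List.append_eq_nil_iff.mp hcon with ⟨h1, _⟩
        have : (runPairs q).length = 0 := by rw [h1]; rfl
        simp [runPairs] at this
        omega
      rw [List.flatMap_cons, List.getLast?_append_of_ne_nil _ hne, ih]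
      simp [List.getLast?_cons_cons]

-- ===== VERDICT (by name: the statement is the Claim_ definition above) =====
theorem validate_double_spec : Claim_equal_validate_double := by
  intro pwd _
  unfold Spec_validate_double validate_double validate_double_alt
  simp only [PySem.List.slice_to_neg_one, PySem.List.slice_from_one]
  set cs := pwd.toList with hcs
  set kept := (runsB cs).filter (fun p => 2 ≤ p.2) with hkept
  have hvalide :
      ((List.zip cs.dropLast cs.tail).map
        (fun fs : Char × Char => if fs.1 == fs.2 then some fs.1 else none)).filterMap id
        = kept.flatMap runPairs := by
    rw [hkept, flatMap_filter_kept _ (runsB_pos cs), flatMap_runsB]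
    rw [← valide_eq_pairsOf]
    rw [List.filterMap_map]
    simp [Function.comp, List.drop_one]
  have h2 : ∀ p ∈ kept, 2 ≤ p.2 := by
    intro p hp
    have := List.of_mem_filter hp
    simpa using this
  rw [hvalide]
  rw [length_flatMap_kept kept]
  by_cases hlen : (kept.map (fun p => p.2 - 1)).sum < 2
  · simp [hlen]
  · have hknil : kept ≠ [] := by
      intro h; rw [h] at hlen; simp at hlen
    simp only [if_neg hlen]
    have hget0 : PySem.List.pyGet? (kept.flatMap runPairs) 0 = (kept.flatMap runPairs).head? := by
      have : (0 : Int) = ((0 : Nat) : Int) := rfl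
      rw [this, PySem.List.pyGet?_natCast]
      cases kept.flatMap runPairs <;> simp
    have hk0 : PySem.List.pyGet? kept 0 = kept.head? := by
      have : (0 : Int) = ((0 : Nat) : Int) := rfl
      rw [this, PySem.List.pyGet?_natCast]
      cases kept <;> simp
    rw [hget0, PySem.List.pyGet?_neg_one, hk0, PySem.List.pyGet?_neg_one]
    rw [head?_flatMap_kept kept h2, getLast?_flatMap_kept kept h2]
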